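-- pv_equiv track=rewrite | github.com/nataliavargas13/dataptmad0923_labs | module-1/code-simplicity-efficiency/your-code/challenge-3.py | find_longest_side
-- ===== SOURCE A (Python) =====
-- def find_longest_side(max_length):
--     longest_side = 0
--     for x in range(5, max_length):
--         for y in range(4, max_length):
--             for z in range(3, max_length):
--                 if x * x == y * y + z * z:
--                     longest_side = max(longest_side, x, y, z)
--     return longest_side
-- ===== SOURCE B (Python) =====
-- def find_longest_side(max_length):
--     squares = {k * k for k in range(4, max_length)}
--     for x in range(max_length - 1, 4, -1):
--         xx = x * x
--         for z in range(3, x):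
--             if xx - z * z in squares:
--                 return x
--     return 0
-- ===== Notes on version B (the rewrite author's own statement) =====
-- stated objective: faster
-- what changed: Replaces A's cubic scan over all (x,y,z) triples by a precomputed set of squares and a descending search over candidate hypotenuses that returns at the first (largest) hit, testing x*x - z*z for membership in the square set.
import Mathlib
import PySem

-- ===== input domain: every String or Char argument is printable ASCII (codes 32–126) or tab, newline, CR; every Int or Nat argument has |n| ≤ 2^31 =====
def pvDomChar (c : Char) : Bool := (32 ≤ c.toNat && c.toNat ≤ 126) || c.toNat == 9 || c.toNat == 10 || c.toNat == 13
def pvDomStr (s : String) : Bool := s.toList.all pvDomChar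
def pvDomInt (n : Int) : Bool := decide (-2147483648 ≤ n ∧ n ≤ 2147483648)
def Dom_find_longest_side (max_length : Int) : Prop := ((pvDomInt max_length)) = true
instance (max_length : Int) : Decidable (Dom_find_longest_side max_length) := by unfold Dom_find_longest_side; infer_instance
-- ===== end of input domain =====

-- B replaces A's cubic triple scan by a set of squares and a descending search for the
-- first hypotenuse with an early return (objective: faster, asymptotic).

-- ===== PORT A =====
def find_longest_side (max_length : Int) : Int :=
  (PySem.List.pyRange 5 max_length 1).foldl (fun longest_side x =>
    (PySem.List.pyRange 4 max_length 1).foldl (fun longest_side y =>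
      (PySem.List.pyRange 3 max_length 1).foldl (fun longest_side z =>
        if x * x = y * y + z * z then max (max (max longest_side x) y) z
        else longest_side) longest_side) longest_side) 0

-- ===== PORT B =====
-- inner 'for z … if … return x' loop of Source B
def pvAltHit (squares : PySem.Set Int) (x : Int) : Bool :=
  (PySem.List.pyRange 3 x 1).any (fun z => PySem.Set.contains squares (x * x - z * z))

-- outer 'for x … return x / fall through to return 0' loop of Source B
def pvAltGo (squares : PySem.Set Int) : List Int → Int
  | [] => 0
  | x :: rest => if pvAltHit squares x then x else pvAltGo squares rest

def find_longest_side_alt (max_length : Int) : Int :=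
  let squares := PySem.Set.ofList ((PySem.List.pyRange 4 max_length 1).map (fun k => k * k))
  pvAltGo squares (PySem.List.pyRange (max_length - 1) 4 (-1))

-- ===== PRECONDITION & SPEC =====
def Spec_find_longest_side (max_length : Int) (out : Int) : Prop := out = find_longest_side_alt max_length
instance (max_length : Int) (out : Int) : Decidable (Spec_find_longest_side max_length out) := by unfold Spec_find_longest_side; infer_instance

-- ===== CLAIM (what is proved, stated in full; the proofs are below) =====
def Claim_equal_find_longest_side : Prop := ∀ (max_length : Int), Dom_find_longest_side max_length → Spec_find_longest_side max_length (find_longest_side max_length)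

-- ===== LEMMAS AND PROOFS =====

-- 'x is a hypotenuse' as A's loops see it
def pvQ (ml x : Int) : Bool :=
  (PySem.List.pyRange 4 ml 1).any fun y =>
    (PySem.List.pyRange 3 ml 1).any fun z => decide (x * x = y * y + z * z)

-- a fold that conditionally records the SAME value x collapses to one if
theorem pv_foldl_if_max_const (p : Int → Bool) (x : Int) :
    ∀ (L : List Int) (ls : Int),
      L.foldl (fun a t => if p t then max a x else a) ls =
      if L.any p then max ls x else ls := by
  intro L
  induction L with
  | nil => intro ls; simp
  | cons hd tl ih =>
    intro ls
    by_cases h : p hd = true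
    · rw [List.foldl_cons, if_pos h, ih]
      simp [List.any_cons, h]
    · rw [List.foldl_cons, if_neg h, ih]
      simp [List.any_cons, h]

-- legs are smaller than the hypotenuse
theorem pv_leg_lt (x y z : Int) (hx : 0 < x) (hy : 0 < y) (hz : 0 < z)
    (h : x * x = y * y + z * z) : y < x ∧ z < x := by
  constructor
  · nlinarith
  · nlinarith

-- A's triple fold is the conditional-max fold over x with predicate pvQ
theorem pvA_eq_fold (ml : Int) :
    find_longest_side ml =
      (PySem.List.pyRange 5 ml 1).foldl
        (fun a x => if pvQ ml x then max a x else a) 0 := by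
  unfold find_longest_side
  apply PySem.List.foldl_congr_mem
  intro a x hx
  rw [PySem.List.mem_pyRange_one] at hx
  have hy' : ∀ acc y, y ∈ PySem.List.pyRange 4 ml 1 →
      (PySem.List.pyRange 3 ml 1).foldl (fun ls z =>
        if x * x = y * y + z * z then max (max (max ls x) y) z else ls) acc =
      if (PySem.List.pyRange 3 ml 1).any (fun z => decide (x * x = y * y + z * z))
        then max acc x else acc := by
    intro acc y hy
    rw [PySem.List.mem_pyRange_one] at hy
    have hb : (PySem.List.pyRange 3 ml 1).foldl (fun ls z =>
        if x * x = y * y + z * z then max (max (max ls x) y) z else ls) acc =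
        (PySem.List.pyRange 3 ml 1).foldl (fun ls z =>
        if decide (x * x = y * y + z * z) then max ls x else ls) acc := by
      apply PySem.List.foldl_congr_mem
      intro ls z hz
      rw [PySem.List.mem_pyRange_one] at hz
      by_cases h : x * x = y * y + z * z
      · have hlt := pv_leg_lt x y z (by omega) (by omega) (by omega) h
        simp [h]
        omega
      · simp [h]
    rw [hb, pv_foldl_if_max_const]
  have hmid : (PySem.List.pyRange 4 ml 1).foldl (fun ls y =>
      (PySem.List.pyRange 3 ml 1).foldl (fun ls z =>
        if x * x = y * y + z * z then max (max (max ls x) y) z else ls) ls) a =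
      (PySem.List.pyRange 4 ml 1).foldl (fun ls y =>
        if (PySem.List.pyRange 3 ml 1).any (fun z => decide (x * x = y * y + z * z))
          then max ls x else ls) a := by
    apply PySem.List.foldl_congr_mem
    intro ls y hy
    exact hy' ls y hy
  rw [hmid, pv_foldl_if_max_const]
  rfl

-- B's outer loop is find?-with-default-0
theorem pvAltGo_eq_find (squares : PySem.Set Int) (L : List Int) :
    pvAltGo squares L = (L.find? (pvAltHit squares)).getD 0 := by
  induction L with
  | nil => rfl
  | cons hd tl ih =>
    by_cases h : pvAltHit squares hd = true
    · simp [pvAltGo, h, List.find?_cons_of_pos]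
    · simp [pvAltGo, h, List.find?_cons_of_neg, ih]

-- B's hit test agrees with pvQ on every x of A's range
theorem pvHit_eq_Q (ml x : Int) (hx : 5 ≤ x) (hxml : x < ml) :
    pvAltHit (PySem.Set.ofList ((PySem.List.pyRange 4 ml 1).map (fun k => k * k))) x
      = pvQ ml x := by
  unfold pvAltHit pvQ
  rw [Bool.eq_iff_iff]
  simp only [List.any_eq_true,
    PySem.Set.contains_iff, PySem.Set.mem_ofList, List.mem_map,
    PySem.List.mem_pyRange_one, decide_eq_true_eq]
  constructor
  · rintro ⟨z, ⟨hz3, hzx⟩, k, ⟨hk4, hkml⟩, hk⟩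
    exact ⟨k, ⟨hk4, hkml⟩, z, ⟨hz3, by omega⟩, by nlinarith⟩
  · rintro ⟨y, ⟨hy4, hyml⟩, z, ⟨hz3, hzml⟩, h⟩
    have hlt := pv_leg_lt x y z (by omega) (by omega) (by omega) h
    exact ⟨z, ⟨hz3, by omega⟩, y, ⟨hy4, hyml⟩, by nlinarith⟩

-- the fold result is 0 or an element of the list
theorem pv_fold_mem (p : Int → Bool) (L : List Int) :
    ∀ ls, (L.foldl (fun a x => if p x then max a x else a) ls = ls ∨
      L.foldl (fun a x => if p x then max a x else a) ls ∈ L ∨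
      (∃ x ∈ L, L.foldl (fun a x => if p x then max a x else a) ls = max ls x)) := by
  intro ls
  induction L generalizing ls with
  | nil => exact Or.inl rfl
  | cons hd tl ih =>
    by_cases h : p hd = true
    · rcases ih (max ls hd) with h1 | h1 | ⟨x, hx, h1⟩
      · right; right; exact ⟨hd, by simp, by simp [h, h1]⟩
      · right; left; simp [h, h1]
      · right; right
        refine ⟨max hd x, ?_, ?_⟩
        · rcases max_choice hd x with hc | hc <;> simp [hc, hx]
        · simp [h, h1]
    · rcases ih ls with h1 | h1 | ⟨x, hx, h1⟩
      · left; simp [h, h1]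
      · right; left; simp [h, h1]
      · right; right; exact ⟨x, by simp [hx], by simp [h, h1]⟩

-- conditional-max fold over a strictly increasing nonneg list = last hit = first hit of the reverse
theorem pv_fold_eq_find_rev (p : Int → Bool) :
    ∀ (L : List Int), L.Pairwise (· < ·) → (∀ x ∈ L, 0 ≤ x) →
      L.foldl (fun a x => if p x then max a x else a) 0 =
      (L.reverse.find? p).getD 0 := by
  intro L
  induction L using List.reverseRecOn with
  | nil => intro _ _; rfl
  | append_singleton L x ih =>
    intro hpw hnn
    have hpwL : L.Pairwise (· < ·) := (List.pairwise_append.mp hpw).1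
    have hlt : ∀ a ∈ L, a < x := by
      intro a ha
      exact (List.pairwise_append.mp hpw).2.2 a ha x (by simp)
    have hnnL : ∀ a ∈ L, (0:Int) ≤ a := fun a ha => hnn a (by simp [ha])
    have hx0 : (0:Int) ≤ x := hnn x (by simp)
    have hFle : L.foldl (fun a x => if p x then max a x else a) 0 ≤ x := by
      rcases pv_fold_mem p L 0 with h1 | h1 | ⟨t, ht, h1⟩
      · omega
      · exact le_of_lt (hlt _ h1)
      · have := hlt t ht; omega
    rw [ih hpwL hnnL] at hFle
    rw [List.foldl_append, List.reverse_append]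
    simp only [List.foldl_cons, List.foldl_nil, List.reverse_singleton,
      List.singleton_append, List.find?_cons]
    by_cases h : p x = true
    · simp [h, ih hpwL hnnL]
      omega
    · simp [h, ih hpwL hnnL]

theorem find_congr_mem (p q : Int → Bool) (L : List Int)
    (h : ∀ x ∈ L, p x = q x) : L.find? p = L.find? q := by
  induction L with
  | nil => rfl
  | cons hd tl ih =>
    have hhd := h hd (by simp)
    rw [List.find?_cons, List.find?_cons, hhd, ih (fun x hx => h x (by simp [hx]))]

-- ===== VERDICT (by name: the statement is the Claim_ definition above) =====
theorem find_longest_side_spec : Claim_equal_find_longest_side := by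
  intro ml _
  unfold Spec_find_longest_side find_longest_side_alt
  rw [pvA_eq_fold]
  rw [pv_fold_eq_find_rev _ _ (PySem.List.pairwise_lt_pyRange_one 5 ml)
    (by intro x hx; rw [PySem.List.mem_pyRange_one] at hx; omega)]
  have hrev : PySem.List.pyRange (ml - 1) 4 (-1) = (PySem.List.pyRange 5 ml 1).reverse := by
    rw [PySem.List.pyRange_neg_one_eq_reverse]
    norm_num
  rw [pvAltGo_eq_find, hrev]
  congr 1
  apply find_congr_mem
  intro x hx
  rw [List.mem_reverse, PySem.List.mem_pyRange_one] at hx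
  exact (pvHit_eq_Q ml x hx.1 hx.2).symm
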